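-- pv_equiv track=rewrite | github.com/JoseAntonioUNMSM/Sequential-and-parallel-programming | Paralela.py | separar_cartas
-- ===== SOURCE A (Python) =====
-- def separar_cartas(trozo_cartas):
--     corazones, diamantes, treboles, espadas, jokers = [], [], [], [], []
--     for carta in trozo_cartas:
--         match carta[1]:
--             case 'Corazones':
--                 corazones.append(carta)
--             case 'Diamantes':
--                 diamantes.append(carta)
--             case 'Treboles':
--                 treboles.append(carta)
--             case 'Espadas':
--                 espadas.append(carta)
--             case _:
--                 jokers.append(carta)
--     return corazones, diamantes, treboles, espadas, jokers
-- ===== SOURCE B (Python) =====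
-- def separar_cartas(trozo_cartas):
--     suits = ('Corazones', 'Diamantes', 'Treboles', 'Espadas')
--     corazones, diamantes, treboles, espadas = (
--         [carta for carta in trozo_cartas if carta[1] == s] for s in suits)
--     jokers = [carta for carta in trozo_cartas if carta[1] not in suits]
--     return corazones, diamantes, treboles, espadas, jokers
-- ===== Notes on version B (the rewrite author's own statement) =====
-- stated objective: alternative
-- what changed: Replaces the single accumulator loop with a five-way match/case by five independent comprehension passes, one filter per suit plus a not-in-suits filter for jokers.
import Mathlib
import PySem

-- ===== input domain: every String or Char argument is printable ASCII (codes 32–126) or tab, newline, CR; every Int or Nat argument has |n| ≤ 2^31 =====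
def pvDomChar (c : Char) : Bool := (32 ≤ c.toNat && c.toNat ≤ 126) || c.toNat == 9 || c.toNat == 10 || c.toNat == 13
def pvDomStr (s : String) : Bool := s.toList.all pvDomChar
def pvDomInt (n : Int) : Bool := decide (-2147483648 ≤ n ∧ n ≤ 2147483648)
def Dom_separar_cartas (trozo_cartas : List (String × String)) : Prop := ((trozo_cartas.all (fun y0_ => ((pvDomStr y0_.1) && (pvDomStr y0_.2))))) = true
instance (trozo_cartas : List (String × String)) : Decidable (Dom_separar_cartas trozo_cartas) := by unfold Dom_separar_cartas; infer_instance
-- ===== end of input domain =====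

-- B replaces A's single accumulator loop (five-way match) by five independent filter passes; alternative, same cost.
-- ===== PORT A =====
-- A's loop: one pass appending each card to the bucket chosen by matching carta[1].
def sepLoopA (cs : List (String × String)) (co di tr es jo : List (String × String)) :
    (List (String × String)) × (List (String × String)) × (List (String × String)) × (List (String × String)) × (List (String × String)) :=
  match cs with
  | [] => (co, di, tr, es, jo)
  | carta :: rest =>
    if carta.2 == "Corazones" then sepLoopA rest (co ++ [carta]) di tr es jo
    else if carta.2 == "Diamantes" then sepLoopA rest co (di ++ [carta]) tr es jo
    else if carta.2 == "Treboles" then sepLoopA rest co di (tr ++ [carta]) es jo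
    else if carta.2 == "Espadas" then sepLoopA rest co di tr (es ++ [carta]) jo
    else sepLoopA rest co di tr es (jo ++ [carta])

def separar_cartas (trozo_cartas : List (String × String)) : (List (String × String)) × (List (String × String)) × (List (String × String)) × (List (String × String)) × (List (String × String)) :=
  sepLoopA trozo_cartas [] [] [] [] []

-- ===== PORT B =====
-- B's five comprehensions: one filter per suit, jokers = suit not in the tuple of suit names.
def separar_cartas_alt (trozo_cartas : List (String × String)) : (List (String × String)) × (List (String × String)) × (List (String × String)) × (List (String × String)) × (List (String × String)) :=
  let suits : List String := ["Corazones", "Diamantes", "Treboles", "Espadas"]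
  (trozo_cartas.filter (fun carta => carta.2 == "Corazones"),
   trozo_cartas.filter (fun carta => carta.2 == "Diamantes"),
   trozo_cartas.filter (fun carta => carta.2 == "Treboles"),
   trozo_cartas.filter (fun carta => carta.2 == "Espadas"),
   trozo_cartas.filter (fun carta => !(suits.contains carta.2)))

-- ===== PRECONDITION & SPEC =====
def Spec_separar_cartas (trozo_cartas : List (String × String)) (out : (List (String × String)) × (List (String × String)) × (List (String × String)) × (List (String × String)) × (List (String × String))) : Prop := out = separar_cartas_alt trozo_cartas
instance (trozo_cartas : List (String × String)) (out : (List (String × String)) × (List (String × String)) × (List (String × String)) × (List (String × String)) × (List (String × String))) : Decidable (Spec_separar_cartas trozo_cartas out) := by unfold Spec_separar_cartas; infer_instance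

-- ===== CLAIM (what is proved, stated in full; the proofs are below) =====
def Claim_equal_separar_cartas : Prop := ∀ (trozo_cartas : List (String × String)), Dom_separar_cartas trozo_cartas → Spec_separar_cartas trozo_cartas (separar_cartas trozo_cartas)

-- ===== LEMMAS AND PROOFS =====

-- ===== VERDICT (by name: the statement is the Claim_ definition above) =====
theorem sepLoopA_filter (cs co di tr es jo : List (String × String)) :
    sepLoopA cs co di tr es jo =
      (co ++ cs.filter (fun c => c.2 == "Corazones"),
       di ++ cs.filter (fun c => c.2 == "Diamantes"),
       tr ++ cs.filter (fun c => c.2 == "Treboles"),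
       es ++ cs.filter (fun c => c.2 == "Espadas"),
       jo ++ cs.filter (fun c => !(["Corazones", "Diamantes", "Treboles", "Espadas"].contains c.2))) := by
  induction cs generalizing co di tr es jo with
  | nil => simp [sepLoopA]
  | cons carta rest ih =>
    by_cases h1 : carta.2 = "Corazones"
    · simp [sepLoopA, ih, List.filter_cons, h1]
    · by_cases h2 : carta.2 = "Diamantes"
      · simp [sepLoopA, ih, List.filter_cons, h2, h1]
      · by_cases h3 : carta.2 = "Treboles"
        · simp [sepLoopA, ih, List.filter_cons, h3, h1, h2]
        · by_cases h4 : carta.2 = "Espadas"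
          · simp [sepLoopA, ih, List.filter_cons, h4, h1, h2, h3]
          · simp [sepLoopA, ih, List.filter_cons, h1, h2, h3, h4]

-- ===== VERDICT (by name: the statement is the Claim_ definition above) =====
theorem separar_cartas_spec : Claim_equal_separar_cartas := by
  intro ts _
  show separar_cartas ts = separar_cartas_alt ts
  simp [separar_cartas, separar_cartas_alt, sepLoopA_filter]
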